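-- pv_equiv track=rewrite | github.com/parthrohilla/Leetcode-Solutions | 1559-detect-cycles-in-2d-grid/1559-detect-cycles-in-2d-grid.py | containsCycle
-- ===== SOURCE A (Python) =====
-- from typing import List
--
-- def containsCycle(grid: List[List[str]]) -> bool:
--     m,n = len(grid), len(grid[0])
--     visited = set()
--
--     def dfs(i,j,px,py):
--         visited.add((i,j))
--         for dx,dy in [[0,1],[1,0],[-1,0],[0,-1]]:
--             x,y = i + dx, j + dy
--             if x>=0 and x<m and y>=0 and y<n and (x,y) != (px,py) and grid[x][y] == grid[i][j]:
--                 if (x,y) in visited: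
--                     return True
--                 if dfs(x,y,i,j):
--                     return True
--
--         return False
--
--
--
--     for i in range(m):
--         for j in range(n):
--             if (i,j) not in visited:
--                 if dfs(i,j,-1,-1):
--                     return True
--     return False
-- ===== SOURCE B (Python) =====
-- from typing import List
--
-- DIRS = ((0, 1), (1, 0), (-1, 0), (0, -1))
--
-- def containsCycle(grid: List[List[str]]) -> bool:
--     m, n = len(grid), len(grid[0])
--     visited = set()
--     for i in range(m):
--         for j in range(n):
--             if (i, j) in visited:
--                 continue
--             visited.add((i, j))
--             # explicit stack of frames: (cell, its parent, next direction index)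
--             stack = [(i, j, -1, -1, 0)]
--             while stack:
--                 ci, cj, pi, pj, d = stack.pop()
--                 if d >= len(DIRS):
--                     continue
--                 stack.append((ci, cj, pi, pj, d + 1))
--                 dx, dy = DIRS[d]
--                 x, y = ci + dx, cj + dy
--                 if 0 <= x < m and 0 <= y < n and (x, y) != (pi, pj) and grid[x][y] == grid[ci][cj]:
--                     if (x, y) in visited:
--                         return True
--                     visited.add((x, y))
--                     stack.append((x, y, ci, cj, 0))
--     return False
-- ===== Notes on version B (the rewrite author's own statement) =====
-- stated objective: alternative
-- what changed: A's recursive DFS (implicit Python call stack, nested closure mutating a shared visited set) is replaced by an iterative machine over an explicit stack of (cell, parent, next-direction-index) frames inside a plain while loop.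
-- outside the precondition, e.g. on containsCycle([]): A raises IndexError, B raises IndexError; on containsCycle([['a', 'a'], ['a', 'a'], ['b', 'b'], ['c']]): A returns True, B returns True
import Mathlib
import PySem

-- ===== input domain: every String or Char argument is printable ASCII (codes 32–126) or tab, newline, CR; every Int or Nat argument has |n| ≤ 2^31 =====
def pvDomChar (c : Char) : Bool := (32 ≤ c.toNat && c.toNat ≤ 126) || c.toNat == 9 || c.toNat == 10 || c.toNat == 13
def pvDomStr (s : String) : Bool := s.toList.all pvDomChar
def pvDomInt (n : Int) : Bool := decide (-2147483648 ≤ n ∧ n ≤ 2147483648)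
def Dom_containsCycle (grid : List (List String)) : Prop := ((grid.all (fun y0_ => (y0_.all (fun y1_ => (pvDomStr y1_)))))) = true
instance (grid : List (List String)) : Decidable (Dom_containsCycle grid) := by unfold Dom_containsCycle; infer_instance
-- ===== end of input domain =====

-- B changes only the mechanism, not the algorithm: the recursion of A's DFS becomes an
-- explicit stack of (cell, parent, next-direction-index) frames driven by a while loop.
-- A mutates only its local 'visited' set; neither program mutates the argument grid.

-- ===== PORT A =====
-- grid[x][y] (both ports access cells only under the bounds guard of the Python condition)
def pvCell (grid : List (List String)) (x y : Int) : Option String :=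
  match PySem.List.pyGet? grid x with
  | none => none
  | some row => PySem.List.pyGet? row y

-- the neighbour condition 'x>=0 and x<m and y>=0 and y<n and (x,y)!=(px,py) and grid[x][y]==grid[i][j]'
-- (identical in both Pythons)
def pvGuard (grid : List (List String)) (m n px py x y i j : Int) : Bool :=
  decide (0 ≤ x ∧ x < m ∧ 0 ≤ y ∧ y < n ∧ (x, y) ≠ (px, py) ∧ pvCell grid x y = pvCell grid i j)

-- [[0,1],[1,0],[-1,0],[0,-1]]
def pvDirs : List (Int × Int) := [(0, 1), (1, 0), (-1, 0), (0, -1)]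

mutual
-- the 'for dx,dy in [...]' loop inside dfs
def dfsDirsA (grid : List (List String)) (m n : Int) (f : Nat) (i j px py : Int)
    (ds : List (Int × Int)) (vis : PySem.Set (Int × Int)) :
    Bool × PySem.Set (Int × Int) :=
  match ds with
  | [] => (false, vis)
  | (dx, dy) :: ds' =>
      let x := i + dx
      let y := j + dy
      if pvGuard grid m n px py x y i j then
        if PySem.Set.contains vis (x, y) then (true, vis)
        else
          match dfsA grid m n f x y i j vis with
          | (true, vis') => (true, vis')
          | (false, vis') => dfsDirsA grid m n f i j px py ds' vis'
      else dfsDirsA grid m n f i j px py ds' vis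
termination_by (f, ds.length + 1)

-- dfs(i,j,px,py); the fuel only bounds the recursion depth (≤ number of cells, proved in the lemmas)
def dfsA (grid : List (List String)) (m n : Int) (f : Nat) (i j px py : Int)
    (vis : PySem.Set (Int × Int)) : Bool × PySem.Set (Int × Int) :=
  match f with
  | 0 => (false, vis)
  | Nat.succ g => dfsDirsA grid m n g i j px py pvDirs (PySem.Set.add vis (i, j))
termination_by (f, 0)
end

-- 'for j in range(n)' of A's outer double loop
def loopJA (grid : List (List String)) (m n : Int) (i : Int) :
    List Int → PySem.Set (Int × Int) → Bool × PySem.Set (Int × Int)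
  | [], vis => (false, vis)
  | j :: js, vis =>
      if PySem.Set.contains vis (i, j) then loopJA grid m n i js vis
      else
        match dfsA grid m n (m.toNat * n.toNat + 1) i j (-1) (-1) vis with
        | (true, vis') => (true, vis')
        | (false, vis') => loopJA grid m n i js vis'

-- 'for i in range(m)'
def loopIA (grid : List (List String)) (m n : Int) :
    List Int → PySem.Set (Int × Int) → Bool
  | [], _ => false
  | i :: is, vis =>
      match loopJA grid m n i (PySem.List.pyRange 0 n 1) vis with
      | (true, _) => true
      | (false, vis') => loopIA grid m n is vis'

def containsCycle (grid : List (List String)) : Bool :=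
  match PySem.List.pyGet? grid 0 with
  | none => false  -- grid[0] raises IndexError on the empty grid: excluded by Pre_
  | some row0 =>
      loopIA grid grid.length row0.length
        (PySem.List.pyRange 0 (grid.length : Int) 1) PySem.Set.empty

-- ===== PORT B =====
-- termination measure for the while loop: cells of the m×n rectangle, the ones not yet visited,
-- and the weight of the frames still on the stack
def pvCells (m n : Int) : List (Int × Int) :=
  (PySem.List.pyRange 0 m 1).flatMap (fun a => (PySem.List.pyRange 0 n 1).map (fun b => (a, b)))

def pvU (m n : Int) (vis : PySem.Set (Int × Int)) : Nat :=
  ((pvCells m n).filter (fun c => !(PySem.Set.contains vis c))).length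

def pvFrameW : Int × Int × Int × Int × Int → Nat
  | (_, _, _, _, d) => (5 - d).toNat

def pvM (m n : Int) (stack : List (Int × Int × Int × Int × Int))
    (vis : PySem.Set (Int × Int)) : Nat :=
  10 * pvU m n vis + (stack.map pvFrameW).sum + stack.length

theorem pv_filter_len_le {α : Type} (l : List α) (p q : α → Bool)
    (h : ∀ a, q a = true → p a = true) :
    (l.filter q).length ≤ (l.filter p).length := by
  induction l with
  | nil => simp
  | cons a l ih =>
      by_cases hq : q a = true
      · simp only [List.filter_cons, hq, h a hq, if_true, List.length_cons]
        omega
      · simp only [List.filter_cons]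
        rw [show q a = false by simpa using hq]
        by_cases hp : p a = true <;> simp [hp] <;> omega

theorem pv_filter_len_lt {α : Type} (l : List α) (p q : α → Bool)
    (h : ∀ a, q a = true → p a = true) (c : α) (hc : c ∈ l)
    (hpc : p c = true) (hqc : q c = false) :
    (l.filter q).length < (l.filter p).length := by
  induction l with
  | nil => cases hc
  | cons a l ih =>
      rcases List.mem_cons.1 hc with rfl | hc'
      · simp only [List.filter_cons, hpc, hqc, if_true, List.length_cons]
        exact Nat.lt_succ_of_le (pv_filter_len_le l p q h)
      · have := ih hc'
        simp only [List.filter_cons]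
        by_cases hq : q a = true
        · simp only [hq, h a hq, if_true, List.length_cons]; omega
        · rw [show q a = false by simpa using hq]
          by_cases hp : p a = true <;> simp [hp] <;> omega

theorem pv_mem_pvCells (m n x y : Int) :
    (x, y) ∈ pvCells m n ↔ 0 ≤ x ∧ x < m ∧ 0 ≤ y ∧ y < n := by
  simp only [pvCells, List.mem_flatMap, List.mem_map, PySem.List.mem_pyRange_one,
    Prod.mk.injEq]
  constructor
  · rintro ⟨a, ha, b, hb, rfl, rfl⟩
    omega
  · rintro ⟨hx, hxm, hy, hyn⟩
    exact ⟨x, ⟨hx, hxm⟩, y, ⟨hy, hyn⟩, rfl, rfl⟩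

theorem pv_contains_false_of_add (vis : PySem.Set (Int × Int)) (c a : Int × Int)
    (h : (PySem.Set.add vis c).contains a = false) : vis.contains a = false := by
  by_contra hne
  simp only [Bool.not_eq_false] at hne
  have hm := (PySem.Set.contains_iff vis a).1 hne
  have hmem : a ∈ PySem.Set.add vis c := (PySem.Set.mem_add _ _ _).2 (Or.inl hm)
  rw [(PySem.Set.contains_iff _ a).2 hmem] at h
  cases h

theorem pvU_add_lt (m n : Int) (vis : PySem.Set (Int × Int)) (c : Int × Int)
    (hc : c ∈ pvCells m n) (hv : PySem.Set.contains vis c = false) :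
    pvU m n (PySem.Set.add vis c) < pvU m n vis := by
  refine pv_filter_len_lt _ _ _ ?_ c hc ?_ ?_
  · intro a ha
    simp only [Bool.not_eq_true'] at ha ⊢
    exact pv_contains_false_of_add vis c a ha
  · have : ¬ c ∈ vis := fun h => by
      rw [(PySem.Set.contains_iff vis c).2 h] at hv; cases hv
    simp [this]
  · have : c ∈ PySem.Set.add vis c := (PySem.Set.mem_add _ _ _).2 (Or.inr rfl)
    simp [this]

-- the while loop over the explicit stack of frames (ci, cj, pi, pj, d)
def runB (grid : List (List String)) (m n : Int) :
    (stack : List (Int × Int × Int × Int × Int)) → (vis : PySem.Set (Int × Int)) →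
    Bool × PySem.Set (Int × Int)
  | [], vis => (false, vis)
  | (ci, cj, pi, pj, d) :: rest, vis =>
      if hd : 4 ≤ d then runB grid m n rest vis
      else
        let dxy := (PySem.List.pyGet? pvDirs d).getD (0, 0)
        let x := ci + dxy.1
        let y := cj + dxy.2
        if hg : pvGuard grid m n pi pj x y ci cj = true then
          if hv : PySem.Set.contains vis (x, y) = true then (true, vis)
          else
            runB grid m n ((x, y, ci, cj, 0) :: (ci, cj, pi, pj, d + 1) :: rest)
              (PySem.Set.add vis (x, y))
        else runB grid m n ((ci, cj, pi, pj, d + 1) :: rest) vis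
termination_by stack vis => pvM m n stack vis
decreasing_by
  · simp only [pvM, List.map_cons, List.sum_cons, List.length_cons]
    omega
  · have hmem : (ci + ((PySem.List.pyGet? pvDirs d).getD (0, 0)).1,
        cj + ((PySem.List.pyGet? pvDirs d).getD (0, 0)).2) ∈ pvCells m n := by
      simp only [pvGuard, decide_eq_true_eq] at hg
      exact (pv_mem_pvCells m n _ _).2 ⟨hg.1, hg.2.1, hg.2.2.1, hg.2.2.2.1⟩
    have hlt := pvU_add_lt m n vis _ hmem (by simpa using hv)
    simp only [pvM, List.map_cons, List.sum_cons, List.length_cons, pvFrameW]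
    omega
  · simp only [pvM, List.map_cons, List.sum_cons, List.length_cons, pvFrameW]
    omega

-- 'for j in range(n)' of B's outer double loop
def loopJB (grid : List (List String)) (m n : Int) (i : Int) :
    List Int → PySem.Set (Int × Int) → Bool × PySem.Set (Int × Int)
  | [], vis => (false, vis)
  | j :: js, vis =>
      if PySem.Set.contains vis (i, j) then loopJB grid m n i js vis
      else
        match runB grid m n [(i, j, -1, -1, 0)] (PySem.Set.add vis (i, j)) with
        | (true, vis') => (true, vis')
        | (false, vis') => loopJB grid m n i js vis'

-- 'for i in range(m)'
def loopIB (grid : List (List String)) (m n : Int) :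
    List Int → PySem.Set (Int × Int) → Bool
  | [], _ => false
  | i :: is, vis =>
      match loopJB grid m n i (PySem.List.pyRange 0 n 1) vis with
      | (true, _) => true
      | (false, vis') => loopIB grid m n is vis'

def containsCycle_alt (grid : List (List String)) : Bool :=
  match PySem.List.pyGet? grid 0 with
  | none => false  -- grid[0] raises IndexError on the empty grid: excluded by Pre_
  | some row0 =>
      loopIB grid grid.length row0.length
        (PySem.List.pyRange 0 (grid.length : Int) 1) PySem.Set.empty

-- ===== PRECONDITION & SPEC =====
-- Pre_ excludes the empty grid (grid[0] raises IndexError) and ragged grids in which some row is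
-- shorter than the first row, on which A's neighbour access grid[x][y] generally raises
-- IndexError (whether A raises or returns first depends on traversal order).
def Pre_containsCycle (grid : List (List String)) : Prop :=
  grid ≠ [] ∧ ∀ row ∈ grid, (grid.head?.getD []).length ≤ row.length

instance (grid : List (List String)) : Decidable (Pre_containsCycle grid) := by
  unfold Pre_containsCycle; infer_instance

def pvWitness_containsCycle : List (List String) := [["a"]]

def Spec_containsCycle (grid : List (List String)) (out : Bool) : Prop := out = containsCycle_alt grid
instance (grid : List (List String)) (out : Bool) : Decidable (Spec_containsCycle grid out) := by unfold Spec_containsCycle; infer_instance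

-- ===== CLAIM (what is proved, stated in full; the proofs are below) =====
def Claim_equal_containsCycle : Prop := ∀ (grid : List (List String)), Dom_containsCycle grid → Pre_containsCycle grid → Spec_containsCycle grid (containsCycle grid)

-- ===== LEMMAS AND PROOFS =====

theorem pvU_add_le (m n : Int) (vis : PySem.Set (Int × Int)) (c : Int × Int) :
    pvU m n (PySem.Set.add vis c) ≤ pvU m n vis := by
  apply pv_filter_len_le
  intro a ha
  simp only [Bool.not_eq_true'] at ha ⊢
  exact pv_contains_false_of_add vis c a ha


-- the DFS only ever adds to 'visited'
theorem pv_dfs_mono (grid : List (List String)) (m n : Int) :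
    ∀ f ds i j px py vis c, c ∈ vis →
      c ∈ (dfsDirsA grid m n f i j px py ds vis).2 := by
  intro f
  induction f using Nat.strong_induction_on with
  | _ f IHf =>
    intro ds
    induction ds with
    | nil =>
        intro i j px py vis c hc
        rw [dfsDirsA]
        exact hc
    | cons hd tl IHds =>
        obtain ⟨dx, dy⟩ := hd
        intro i j px py vis c hc
        rw [dfsDirsA]
        by_cases hg : pvGuard grid m n px py (i + dx) (j + dy) i j = true
        · simp only [hg, if_true]
          by_cases hv : PySem.Set.contains vis (i + dx, j + dy) = true
          · rw [if_pos hv]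
            exact hc
          · rw [if_neg hv]
            have hmem' : ∀ v', c ∈ v' → c ∈ (dfsA grid m n f (i + dx) (j + dy) i j v').2 := by
              intro v' hcv
              cases f with
              | zero => simpa [dfsA] using hcv
              | succ g =>
                  rw [dfsA]
                  exact IHf g (Nat.lt_succ_self g) pvDirs _ _ _ _ _ c
                    ((PySem.Set.mem_add _ _ _).2 (Or.inl hcv))
            rcases hres : dfsA grid m n f (i + dx) (j + dy) i j vis with ⟨b, vis'⟩
            have hcv' : c ∈ vis' := by
              have := hmem' vis hc
              rw [hres] at this
              exact this
            cases b
            · simpa using IHds i j px py vis' c hcv'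
            · simpa using hcv'
        · simp only [hg, if_false, Bool.false_eq_true]
          exact IHds i j px py vis c hc

theorem pvU_anti (m n : Int) (s t : PySem.Set (Int × Int))
    (h : ∀ c, c ∈ s → c ∈ t) : pvU m n t ≤ pvU m n s := by
  apply pv_filter_len_le
  intro a ha
  simp at ha ⊢
  exact fun hm => ha (h a hm)

theorem pvU_pos (m n : Int) (vis : PySem.Set (Int × Int)) (c : Int × Int)
    (hc : c ∈ pvCells m n) (hv : PySem.Set.contains vis c = false) :
    0 < pvU m n vis := by
  have hnv : ¬ c ∈ vis := fun h => by
    rw [(PySem.Set.contains_iff vis c).2 h] at hv; cases hv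
  have hmem : c ∈ (pvCells m n).filter (fun c => !(PySem.Set.contains vis c)) := by
    simp only [List.mem_filter]
    exact ⟨hc, by simp [hnv]⟩
  have := List.length_pos_of_mem hmem
  simpa [pvU] using this

-- the machine simulates the recursive DFS: a frame (i,j,px,py,k) behaves like the
-- remaining direction list (drop k pvDirs) of dfs(i,j,px,py)
theorem pv_sim (grid : List (List String)) (m n : Int) :
    ∀ f ds k i j px py vis rest, List.drop k pvDirs = ds → k ≤ 4 →
      pvU m n vis ≤ f →
      runB grid m n ((i, j, px, py, (k : Int)) :: rest) vis =
        (match dfsDirsA grid m n f i j px py ds vis with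
         | (true, v) => (true, v)
         | (false, v) => runB grid m n rest v) := by
  intro f
  induction f using Nat.strong_induction_on with
  | _ f IHf =>
    intro ds
    induction ds with
    | nil =>
        intro k i j px py vis rest hds hk hU
        have hk4 : k = 4 := by
          have := congrArg List.length hds
          simp only [List.length_drop, pvDirs] at this
          simp at this
          omega
        subst hk4
        rw [runB, dif_pos (by norm_num : (4 : Int) ≤ ((4 : Nat) : Int))]
        rw [dfsDirsA]
    | cons hd tl IHds =>
        intro k i j px py vis rest hds hk hU
        obtain ⟨dx, dy⟩ := hd
        have hk3 : k ≤ 3 := by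
          have := congrArg List.length hds
          simp only [List.length_drop, pvDirs] at this
          simp at this
          omega
        have h1 : PySem.List.pyGet? pvDirs (k : Int) = some (dx, dy) := by
          rw [PySem.List.pyGet?_natCast, ← List.head?_drop, hds]
          rfl
        have htl : List.drop (k + 1) pvDirs = tl := by
          rw [← List.tail_drop, hds]
          rfl
        rw [runB, dif_neg (by omega : ¬ (4 : Int) ≤ ((k : Nat) : Int))]
        simp only [h1, Option.getD_some]
        rw [dfsDirsA]
        by_cases hg : pvGuard grid m n px py (i + dx) (j + dy) i j = true
        · rw [dif_pos hg, if_pos hg]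
          by_cases hv : PySem.Set.contains vis (i + dx, j + dy) = true
          · rw [dif_pos hv, if_pos hv]
          · rw [dif_neg hv, if_neg hv]
            have hvf : PySem.Set.contains vis (i + dx, j + dy) = false := by
              simpa using hv
            have hcell : (i + dx, j + dy) ∈ pvCells m n := by
              simp only [pvGuard, decide_eq_true_eq] at hg
              exact (pv_mem_pvCells m n _ _).2 ⟨hg.1, hg.2.1, hg.2.2.1, hg.2.2.2.1⟩
            have hUpos : 0 < pvU m n vis := pvU_pos m n vis _ hcell hvf
            obtain ⟨g, rfl⟩ : ∃ g, f = g + 1 := ⟨f - 1, by omega⟩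
            have hUadd : pvU m n (PySem.Set.add vis (i + dx, j + dy)) ≤ g := by
              have := pvU_add_lt m n vis _ hcell hvf
              omega
            have hA : dfsA grid m n (g + 1) (i + dx) (j + dy) i j vis =
                dfsDirsA grid m n g (i + dx) (j + dy) i j pvDirs
                  (PySem.Set.add vis (i + dx, j + dy)) := by
              rw [dfsA]
            have L1 := IHf g (Nat.lt_succ_self g) pvDirs 0 (i + dx) (j + dy) i j
              (PySem.Set.add vis (i + dx, j + dy))
              ((i, j, px, py, (k : Int) + 1) :: rest) rfl (by omega) hUadd
            simp only [Nat.cast_zero] at L1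
            rw [L1]
            rcases hres : dfsDirsA grid m n g (i + dx) (j + dy) i j pvDirs
                (PySem.Set.add vis (i + dx, j + dy)) with ⟨b, v⟩
            rw [hA, hres]
            cases b
            · have hUv : pvU m n v ≤ g + 1 := by
                have hmono : ∀ c, c ∈ PySem.Set.add vis (i + dx, j + dy) → c ∈ v := by
                  intro c hcmem
                  have := pv_dfs_mono grid m n g pvDirs (i + dx) (j + dy) i j
                    (PySem.Set.add vis (i + dx, j + dy)) c hcmem
                  rw [hres] at this
                  exact this
                have := pvU_anti m n _ v hmono
                omega
              have L2 := IHds (k + 1) i j px py v rest htl (by omega) hUv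
              push_cast at L2
              dsimp only
              rw [L2]
            · rfl
        · rw [dif_neg hg, if_neg hg]
          have L2 := IHds (k + 1) i j px py vis rest htl (by omega) hU
          push_cast at L2
          rw [L2]

theorem pvU_le_cells (m n : Int) (vis : PySem.Set (Int × Int)) :
    pvU m n vis ≤ m.toNat * n.toNat := by
  have h := List.length_filter_le (fun c => !(PySem.Set.contains vis c)) (pvCells m n)
  have hlen : (pvCells m n).length = m.toNat * n.toNat := by
    simp [pvCells, List.length_flatMap]
  simpa [pvU, hlen] using h

theorem pv_loopJ_eq (grid : List (List String)) (m n : Int) :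
    ∀ js i vis, loopJA grid m n i js vis = loopJB grid m n i js vis := by
  intro js
  induction js with
  | nil => intro i vis; rfl
  | cons j js ih =>
      intro i vis
      rw [loopJA, loopJB]
      by_cases hv : PySem.Set.contains vis (i, j) = true
      · rw [if_pos hv, if_pos hv, ih]
      · rw [if_neg hv, if_neg hv]
        have hU : pvU m n (PySem.Set.add vis (i, j)) ≤ m.toNat * n.toNat :=
          le_trans (pvU_add_le m n vis (i, j)) (pvU_le_cells m n vis)
        have hsim := pv_sim grid m n (m.toNat * n.toNat) pvDirs 0 i j (-1) (-1)
          (PySem.Set.add vis (i, j)) [] rfl (by omega) hU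
        simp only [Nat.cast_zero] at hsim
        have hA : dfsA grid m n (m.toNat * n.toNat + 1) i j (-1) (-1) vis =
            dfsDirsA grid m n (m.toNat * n.toNat) i j (-1) (-1) pvDirs
              (PySem.Set.add vis (i, j)) := by
          rw [dfsA]
        rw [hA, hsim]
        rcases hres : dfsDirsA grid m n (m.toNat * n.toNat) i j (-1) (-1) pvDirs
            (PySem.Set.add vis (i, j)) with ⟨b, v⟩
        cases b
        · dsimp only
          rw [runB, ih]
        · rfl

theorem pv_loopI_eq (grid : List (List String)) (m n : Int) :
    ∀ is vis, loopIA grid m n is vis = loopIB grid m n is vis := by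
  intro is
  induction is with
  | nil => intro vis; rfl
  | cons i is ih =>
      intro vis
      simp only [loopIA, loopIB, pv_loopJ_eq]
      rcases h : loopJB grid m n i (PySem.List.pyRange 0 n 1) vis with ⟨b, vis'⟩
      cases b <;> simp [ih]

theorem pv_top (grid : List (List String)) : containsCycle grid = containsCycle_alt grid := by
  unfold containsCycle containsCycle_alt
  rcases h : PySem.List.pyGet? grid 0 with _ | row0
  · rfl
  · exact pv_loopI_eq grid _ _ _ _

-- ===== VERDICT (by name: the statement is the Claim_ definition above) =====
theorem containsCycle_spec : Claim_equal_containsCycle := by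
  intro grid _ _
  exact pv_top grid
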